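-- pv_equiv track=rewrite | github.com/mwoss/algorithms | interviews/q/discounts.py | count_discount
-- ===== SOURCE A (Python) =====
-- from typing import List
--
-- def count_discount(products: List[str], transactions: List[str]) -> int:
--     sold_qts = {product: 0 for product in products}
--     least_sold_qty = 0
--     count = 0
--     for transaction in transactions:
--         if sold_qts[transaction] == least_sold_qty:
--             count += 1
--
--         sold_qts[transaction] += 1
--
--         least_sold_qty = sold_qts[min(sold_qts, key=lambda e: sold_qts[e])]
--
--     return count
-- ===== SOURCE B (Python) =====
-- from typing import List
--
-- def count_discount(products: List[str], transactions: List[str]) -> int: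
--     # O(P + T): track the current minimum incrementally with a histogram of counts;
--     # the minimum can only rise, by exactly 1, when the last product at the minimum is sold.
--     counts = {p: 0 for p in products}
--     hist = {0: len(counts)}
--     m = 0
--     count = 0
--     for t in transactions:
--         v = counts[t]
--         if v == m:
--             count += 1
--         counts[t] = v + 1
--         hist[v] -= 1
--         hist[v + 1] = hist.get(v + 1, 0) + 1
--         if v == m and hist[m] == 0:
--             m += 1
--     return count
-- ===== Notes on version B (the rewrite author's own statement) =====
-- stated objective: alternative
-- what changed: Instead of recomputing the minimum sold quantity with a full min() scan over all products after every transaction, B maintains a histogram of quantities and a count-at-minimum bucket, so the minimum is updated in O(1) per transaction (intended as asymptotically faster, O(T+P) vs O(T*P); a timing run measured only 1.24-1.45x on its generated inputs, so no speed is claimed).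
import Mathlib
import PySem

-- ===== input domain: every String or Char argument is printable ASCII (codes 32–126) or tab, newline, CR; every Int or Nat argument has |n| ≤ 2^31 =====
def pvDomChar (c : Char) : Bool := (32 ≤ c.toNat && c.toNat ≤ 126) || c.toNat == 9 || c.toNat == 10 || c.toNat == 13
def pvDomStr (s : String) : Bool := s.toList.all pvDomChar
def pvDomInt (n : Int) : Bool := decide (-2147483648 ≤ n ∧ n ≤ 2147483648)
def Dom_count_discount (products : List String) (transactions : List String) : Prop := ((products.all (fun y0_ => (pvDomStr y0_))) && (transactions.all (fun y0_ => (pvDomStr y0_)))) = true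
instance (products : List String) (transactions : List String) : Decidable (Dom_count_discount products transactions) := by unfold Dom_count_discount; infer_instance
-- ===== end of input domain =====

-- B replaces A's per-transaction min() scan over all products by a histogram of
-- quantities with a count-at-minimum bucket, updating the minimum in O(1) per step.

-- ===== PORT A =====
-- one loop iteration of A: check against least, increment sold_qts[t], recompute least by min()
-- (sold_qts[transaction] is getD t 0: Python raises KeyError for a missing key — excluded by Pre_;
--  the 'none' branch of min() is Python's ValueError on an empty dict — also excluded by Pre_)
def pvStepA (s : PySem.Dict String Int × Int × Int) (t : String) :
    PySem.Dict String Int × Int × Int :=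
  let d := s.1
  let least := s.2.1
  let count := if d.getD t 0 = least then s.2.2 + 1 else s.2.2
  let d' := d.modify t 0 (· + 1)
  let least' :=
    match PySem.List.min? d'.keys (fun e => d'.getD e 0) with
    | some k => d'.getD k 0
    | none => least
  (d', least', count)

def count_discount (products : List String) (transactions : List String) : Int :=
  let sold := products.foldl (fun d p => d.insert p 0) PySem.Dict.empty
  (transactions.foldl pvStepA (sold, 0, 0)).2.2

-- ===== PORT B =====
-- one loop iteration of B: check against m, overwrite counts[t], move one unit in the histogram,
-- bump m when the bucket at the minimum empties (hist[v] -= 1 is modify v 0 (· - 1): the key is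
-- present on every input admitted by Pre_)
def pvStepB (s : PySem.Dict String Int × PySem.Dict Int Int × Int × Int) (t : String) :
    PySem.Dict String Int × PySem.Dict Int Int × Int × Int :=
  let c := s.1
  let hist := s.2.1
  let m := s.2.2.1
  let v := c.getD t 0
  let count := if v = m then s.2.2.2 + 1 else s.2.2.2
  let c' := c.insert t (v + 1)
  let hist1 := hist.modify v 0 (· - 1)
  let hist2 := hist1.modify (v + 1) 0 (· + 1)
  let m' := if v = m ∧ hist2.getD m 0 = 0 then m + 1 else m
  (c', hist2, m', count)

def count_discount_alt (products : List String) (transactions : List String) : Int :=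
  let counts := products.foldl (fun d p => d.insert p 0) PySem.Dict.empty
  let hist : PySem.Dict Int Int := PySem.Dict.empty.insert 0 (counts.size : Int)
  (transactions.foldl pvStepB (counts, hist, 0, 0)).2.2.2

-- ===== PRECONDITION & SPEC =====
-- Pre_ excludes transactions naming a product not in `products`: there Python's
-- sold_qts[transaction] raises KeyError (and min() would raise ValueError on no products).
def Pre_count_discount (products : List String) (transactions : List String) : Prop :=
  ∀ t ∈ transactions, t ∈ products
instance (products : List String) (transactions : List String) : Decidable (Pre_count_discount products transactions) := by unfold Pre_count_discount; infer_instance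

def pvWitness_count_discount : List String × List String := (["a", "b"], ["a", "a", "b"])

def Spec_count_discount (products : List String) (transactions : List String) (out : Int) : Prop := out = count_discount_alt products transactions
instance (products : List String) (transactions : List String) (out : Int) : Decidable (Spec_count_discount products transactions out) := by unfold Spec_count_discount; infer_instance

-- ===== CLAIM (what is proved, stated in full; the proofs are below) =====
def Claim_equal_count_discount : Prop := ∀ (products : List String) (transactions : List String), Dom_count_discount products transactions → Pre_count_discount products transactions → Spec_count_discount products transactions (count_discount products transactions)

-- ===== LEMMAS AND PROOFS =====

-- the joint invariant of the two loops (the count accumulator is carried separately, identical on both sides)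
def pvInv (dA dB : PySem.Dict String Int) (least m : Int) (hist : PySem.Dict Int Int) : Prop :=
  dA.keys = dB.keys ∧
  dA.keys.Nodup ∧
  (∀ k, dA.getD k 0 = dB.getD k 0) ∧
  least = m ∧
  (∀ k ∈ dA.keys, m ≤ dA.getD k 0) ∧
  (dA.keys ≠ [] → ∃ k ∈ dA.keys, dA.getD k 0 = m) ∧
  (∀ w : Int, hist.getD w 0 = ((dA.keys.map (fun k => dA.getD k 0)).count w : Int))

-- how the multiset of values changes when one key's value is overwritten
lemma pv_count_map_update (K : List String) (t : String) (f : String → Int) (w new : Int) :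
    K.Nodup → t ∈ K →
    ((K.map (fun k => if k = t then new else f k)).count w : Int)
      = ((K.map f).count w : Int)
        + (if w = new then 1 else 0) - (if w = f t then 1 else 0) := by
  induction K with
  | nil => intro _ ht; cases ht
  | cons a K ih =>
    intro hnd ht
    rcases List.nodup_cons.mp hnd with ⟨ha, hK⟩
    rcases List.mem_cons.mp ht with h | h
    · subst h
      have hmap : K.map (fun k => if k = t then new else f k) = K.map f :=
        List.map_congr_left (fun x hx => by
          have hx' : x ≠ t := fun e => ha (e ▸ hx)
          simp [hx'])
      simp only [List.map_cons, hmap, List.count_cons, beq_iff_eq]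
      split_ifs <;> push_cast <;> omega
    · have hat : a ≠ t := fun e => ha (e ▸ h)
      have hrec := ih hK h
      simp only [List.map_cons, if_neg hat, List.count_cons, beq_iff_eq]
      split_ifs at hrec ⊢ <;> push_cast at hrec ⊢ <;> omega

-- all values start at 0
lemma pv_getD_init (ps : List String) (d : PySem.Dict String Int)
    (h : ∀ k, d.getD k 0 = 0) :
    ∀ k, (ps.foldl (fun d p => d.insert p 0) d).getD k 0 = 0 := by
  induction ps generalizing d with
  | nil => exact h
  | cons p ps ih =>
    intro k
    exact ih (d.insert p 0) (fun k => by rw [PySem.Dict.getD_insert]; split <;> simp [h]) k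

-- the main simulation: the two loops produce the same count from any pair of states
-- related by the invariant
lemma pv_loop (ts : List String) (dA dB : PySem.Dict String Int)
    (m cnt : Int) (hist : PySem.Dict Int Int)
    (hts : ∀ t ∈ ts, t ∈ dA.keys)
    (hI : pvInv dA dB m m hist) :
    (ts.foldl pvStepA (dA, m, cnt)).2.2
      = (ts.foldl pvStepB (dB, hist, m, cnt)).2.2.2 := by
  induction ts generalizing dA dB m cnt hist with
  | nil => rfl
  | cons t ts ih =>
    obtain ⟨hkeys, hnd, hpt, -, hlb, hat, hhist⟩ := hI
    have ht : t ∈ dA.keys := hts t (List.mem_cons_self ..)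
    have hKne : dA.keys ≠ [] := List.ne_nil_of_mem ht
    have htB : t ∈ dB.keys := hkeys ▸ ht
    set v := dA.getD t 0 with hv
    have hvB : dB.getD t 0 = v := by rw [hv, hpt t]
    set dA' := dA.modify t 0 (· + 1) with hdA'
    set dB' := dB.insert t (v + 1) with hdB'
    set hist2 := (hist.modify v 0 (· - 1)).modify (v + 1) 0 (· + 1) with hhist2
    set m' : Int := if v = m ∧ hist2.getD m 0 = 0 then m + 1 else m with hm'
    -- keys are unchanged on both sides
    have hkA' : dA'.keys = dA.keys := by
      rw [hdA', PySem.Dict.keys_modify]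
      exact PySem.Dict.keys_insert_of_contains _ _ ((PySem.Dict.contains_iff_mem_keys _ _).mpr ht)
    have hkB' : dB'.keys = dB.keys :=
      PySem.Dict.keys_insert_of_contains _ _ ((PySem.Dict.contains_iff_mem_keys _ _).mpr htB)
    -- pointwise values after the step
    have hptA' : ∀ k, dA'.getD k 0 = if k = t then v + 1 else dA.getD k 0 := fun k => by
      rw [hdA', PySem.Dict.getD_modify]
    have hptB' : ∀ k, dB'.getD k 0 = if k = t then v + 1 else dB.getD k 0 := fun k => by
      rw [hdB', PySem.Dict.getD_insert]
    -- the new multiset of values, counted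
    have hnewvals : dA.keys.map (fun k => dA'.getD k 0)
        = dA.keys.map (fun k => if k = t then v + 1 else dA.getD k 0) :=
      List.map_congr_left (fun k _ => hptA' k)
    have hcnt : ∀ w : Int, ((dA.keys.map (fun k => dA'.getD k 0)).count w : Int)
        = ((dA.keys.map (fun k => dA.getD k 0)).count w : Int)
          + (if w = v + 1 then 1 else 0) - (if w = v then 1 else 0) := by
      intro w
      rw [hnewvals]
      exact pv_count_map_update dA.keys t _ w (v + 1) hnd ht
    -- the histogram stays the exact multiset of values
    have hh2 : ∀ w : Int, hist2.getD w 0 = ((dA.keys.map (fun k => dA'.getD k 0)).count w : Int) := by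
      intro w
      rw [hhist2, PySem.Dict.getD_modify, PySem.Dict.getD_modify, PySem.Dict.getD_modify,
        hcnt w]
      simp only [hhist]
      by_cases h1 : w = v + 1
      · subst h1
        split_ifs <;> omega
      · by_cases h2 : w = v
        · subst h2
          split_ifs <;> omega
        · split_ifs
          omega
    -- v is attained, so its bucket is positive
    have hvpos : 0 < (dA.keys.map (fun k => dA.getD k 0)).count v :=
      List.count_pos_iff.mpr (List.mem_map.mpr ⟨t, ht, rfl⟩)
    have hmv : m ≤ v := hlb t ht
    -- the new minimum is m': a lower bound on all new values, and attained
    have hlb' : ∀ k ∈ dA.keys, m' ≤ dA'.getD k 0 := by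
      intro k hk
      rw [hptA' k, hm']
      by_cases hcond : v = m ∧ hist2.getD m 0 = 0
      · obtain ⟨hvm, hz⟩ := hcond
        rw [if_pos ⟨hvm, hz⟩]
        have hzc := hh2 m
        by_cases hkt : k = t
        · rw [if_pos hkt]; omega
        · rw [if_neg hkt]
          have hnm : dA.getD k 0 ≠ m := by
            intro he
            have hmem : m ∈ dA.keys.map (fun k => dA'.getD k 0) :=
              List.mem_map.mpr ⟨k, hk, by rw [hptA' k, if_neg hkt, he]⟩
            have := List.count_pos_iff.mpr hmem
            omega
          have := hlb k hk
          omega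
      · rw [if_neg hcond]
        by_cases hkt : k = t
        · rw [if_pos hkt]; omega
        · rw [if_neg hkt]; exact hlb k hk
    have hat' : ∃ k ∈ dA.keys, dA'.getD k 0 = m' := by
      rw [hm']
      by_cases hcond : v = m ∧ hist2.getD m 0 = 0
      · rw [if_pos hcond]
        exact ⟨t, ht, by rw [hptA' t, if_pos rfl, hcond.1]⟩
      · rw [if_neg hcond]
        by_cases hvm : v = m
        · have hz : hist2.getD m 0 ≠ 0 := fun hz => hcond ⟨hvm, hz⟩
          rw [hh2 m] at hz
          have hmem : m ∈ dA.keys.map (fun k => dA'.getD k 0) :=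
            List.count_pos_iff.mp (by omega)
          obtain ⟨k, hk, he⟩ := List.mem_map.mp hmem
          exact ⟨k, hk, he⟩
        · obtain ⟨k0, hk0, hk0v⟩ := hat hKne
          have hk0t : k0 ≠ t := fun e => hvm (by rw [hv, ← e, hk0v])
          exact ⟨k0, hk0, by rw [hptA' k0, if_neg hk0t, hk0v]⟩
    -- A's min() recomputation yields exactly m'
    obtain ⟨km, hkm⟩ : ∃ km, PySem.List.min? dA'.keys (fun e => dA'.getD e 0) = some km := by
      rcases h : PySem.List.min? dA'.keys (fun e => dA'.getD e 0) with _ | km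
      · exact absurd ((PySem.List.min?_eq_none_iff _ _).mp h) (hkA' ▸ hKne)
      · exact ⟨km, rfl⟩
    have hleast' : dA'.getD km 0 = m' := by
      obtain ⟨k0, hk0, hk0e⟩ := hat'
      have h1 : dA'.getD km 0 ≤ dA'.getD k0 0 :=
        PySem.List.min?_isMin hkm k0 (hkA' ▸ hk0)
      have h2 : m' ≤ dA'.getD km 0 := hlb' km (hkA' ▸ PySem.List.min?_mem hkm)
      omega
    -- reduce one step of each fold
    have hstepA : pvStepA (dA, m, cnt) t = (dA', m', if v = m then cnt + 1 else cnt) := by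
      simp only [pvStepA, ← hv, ← hdA', hkm, hleast']
    have hstepB : pvStepB (dB, hist, m, cnt) t
        = (dB', hist2, m', if v = m then cnt + 1 else cnt) := by
      simp only [pvStepB, hvB, ← hdB', ← hhist2, ← hm']
    rw [List.foldl_cons, List.foldl_cons, hstepA, hstepB]
    -- re-establish the invariant and recurse
    refine ih dA' dB' m' _ hist2 (fun x hx => by rw [hkA']; exact hts x (List.mem_cons_of_mem t hx)) ?_
    refine ⟨by rw [hkA', hkB', hkeys], by rw [hkA']; exact hnd, ?_, rfl, ?_, ?_, ?_⟩
    · intro k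
      rw [hptA' k, hptB' k]
      split
      · rfl
      · exact hpt k
    · intro k hk
      rw [hkA'] at hk
      exact hlb' k hk
    · intro _
      obtain ⟨k, hk, he⟩ := hat'
      exact ⟨k, by rw [hkA']; exact hk, he⟩
    · intro w
      rw [hkA']
      exact hh2 w

-- ===== VERDICT (by name: the statement is the Claim_ definition above) =====
theorem count_discount_spec : Claim_equal_count_discount := by
  intro products transactions _ hPre
  unfold Spec_count_discount count_discount count_discount_alt
  have hzero : ∀ k, (products.foldl (fun d p => d.insert p 0) PySem.Dict.empty).getD k (0 : Int) = 0 :=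
    pv_getD_init products PySem.Dict.empty (fun k => by rw [PySem.Dict.getD_empty])
  have hmem : ∀ x, x ∈ (products.foldl (fun d p => d.insert p (0 : Int)) PySem.Dict.empty).keys ↔ x ∈ products := by
    intro x
    have hk := PySem.Dict.keys_foldl_insert products (fun _ _ => (0 : Int)) PySem.Dict.empty
    rw [show (products.foldl (fun d p => d.insert p (0 : Int)) PySem.Dict.empty)
        = (List.foldl (fun d x => d.insert x ((fun _ _ => (0 : Int)) d x)) PySem.Dict.empty products) from rfl, hk]
    rw [PySem.Set.mem_update]
    simp [PySem.Dict.keys_empty]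
  have hnd : (products.foldl (fun d p => d.insert p (0 : Int)) PySem.Dict.empty).keys.Nodup :=
    PySem.Dict.nodup_keys_foldl_insert products (fun _ _ => (0 : Int)) PySem.Dict.empty
      (by rw [PySem.Dict.keys_empty]; exact List.nodup_nil)
  apply pv_loop
  · exact fun t htt => (hmem t).mpr (hPre t htt)
  · refine ⟨rfl, hnd, fun k => rfl, rfl, fun k _ => (hzero k).ge, fun hne => ?_, fun w => ?_⟩
    · rcases h : (products.foldl (fun d p => d.insert p (0 : Int)) PySem.Dict.empty).keys with _ | ⟨k, ks⟩
      · exact absurd h hne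
      · exact ⟨k, by rw [h]; exact List.mem_cons_self .., hzero k⟩
    · rw [PySem.Dict.getD_insert]
      have hmap : (products.foldl (fun d p => d.insert p (0 : Int)) PySem.Dict.empty).keys.map
            (fun k => (products.foldl (fun d p => d.insert p (0 : Int)) PySem.Dict.empty).getD k 0)
          = List.replicate (products.foldl (fun d p => d.insert p (0 : Int)) PySem.Dict.empty).keys.length 0 := by
        rw [List.eq_replicate_iff]
        exact ⟨by simp, fun b hb => by obtain ⟨k, -, hk⟩ := List.mem_map.mp hb; rw [← hk, hzero k]⟩
      rw [hmap, List.count_replicate]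
      have hsz : ((products.foldl (fun d p => d.insert p (0 : Int)) PySem.Dict.empty).size : Int)
          = ((products.foldl (fun d p => d.insert p (0 : Int)) PySem.Dict.empty).keys.length : Int) := by
        simp [PySem.Dict.size, PySem.Dict.keys]
      by_cases h : w = 0
      · rw [if_pos h, hsz]
        simp [h]
      · rw [if_neg h, PySem.Dict.getD_empty]
        simp [beq_iff_eq, Ne.symm h]
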